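-- pv_equiv track=rewrite | github.com/uzh-dqbm-cmi/hcup_research | src/explore_hcupdata.py | generate_elms_info
-- ===== SOURCE A (Python) =====
-- def generate_elms_info(elm_desc):
--     elm_info = {'colnames':[], 'coldesc':[], 'coltype':[]}
--     for elm_tuple in elm_desc:
--         prefix, num_cols, desc, coltype = elm_tuple
--         if(num_cols):
--             for i in range(1, num_cols+1):
--                 elm_info['colnames'].append(prefix+str(i))
--                 elm_info['coldesc'].append(desc + " " + str(i))
--                 elm_info['coltype'].append(coltype)
--         else:
--             elm_info['colnames'].append(prefix)
--             elm_info['coldesc'].append(desc)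
--             elm_info['coltype'].append(coltype)
--     return(elm_info)
-- ===== SOURCE B (Python) =====
-- def generate_elms_info(elm_desc):
--     # one flat pass builds (name, desc, type) triples; a second pass transposes them
--     rows = [triple
--             for (prefix, num_cols, desc, coltype) in elm_desc
--             for triple in ([(prefix + str(i), desc + " " + str(i), coltype)
--                             for i in range(1, num_cols + 1)]
--                            if num_cols else [(prefix, desc, coltype)])]
--     if rows:
--         names, descs, types = (list(col) for col in zip(*rows))
--     else:
--         names, descs, types = [], [], []
--     return {'colnames': names, 'coldesc': descs, 'coltype': types}
-- ===== Notes on version B (the rewrite author's own statement) =====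
-- stated objective: alternative
-- what changed: Instead of interleaved appends into three dict-held lists, B builds one flat list of (name, desc, type) triples with a nested comprehension and then transposes it with zip(*rows) in a separate pass.
import Mathlib
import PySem

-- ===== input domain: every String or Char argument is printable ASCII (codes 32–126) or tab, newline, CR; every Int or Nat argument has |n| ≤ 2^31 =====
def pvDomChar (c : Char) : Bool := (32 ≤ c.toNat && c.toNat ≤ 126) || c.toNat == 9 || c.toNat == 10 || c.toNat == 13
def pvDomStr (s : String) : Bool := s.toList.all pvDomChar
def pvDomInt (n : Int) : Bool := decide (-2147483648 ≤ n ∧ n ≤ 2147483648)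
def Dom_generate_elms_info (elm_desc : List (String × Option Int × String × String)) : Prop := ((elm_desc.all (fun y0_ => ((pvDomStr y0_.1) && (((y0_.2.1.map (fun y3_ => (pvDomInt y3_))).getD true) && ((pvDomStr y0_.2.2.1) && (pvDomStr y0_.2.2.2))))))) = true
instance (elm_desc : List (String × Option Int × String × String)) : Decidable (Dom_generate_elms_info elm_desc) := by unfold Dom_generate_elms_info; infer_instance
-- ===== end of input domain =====

-- B builds one flat list of (name, desc, type) triples and transposes it in a second pass,
-- instead of A's interleaved appends into three dict-held lists.

-- ===== PORT A =====
-- A keeps a dict of three lists and appends into them in place (modeled with Dict.modify).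
def generate_elms_info (elm_desc : List (String × Option Int × String × String)) : List (String × List String) :=
  let init : PySem.Dict String (List String) :=
    PySem.Dict.ofList [("colnames", []), ("coldesc", []), ("coltype", [])]
  (elm_desc.foldl (fun d t =>
    let pfx := t.1
    let num_cols := t.2.1
    let desc := t.2.2.1
    let coltype := t.2.2.2
    if (match num_cols with | some n => n != 0 | none => false) then
      (PySem.List.pyRange 1 (num_cols.getD 0 + 1) 1).foldl (fun d i =>
        ((d.modify "colnames" [] (· ++ [pfx ++ PySem.Int.toStr i])
         ).modify "coldesc" [] (· ++ [desc ++ " " ++ PySem.Int.toStr i])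
         ).modify "coltype" [] (· ++ [coltype])) d
    else
      ((d.modify "colnames" [] (· ++ [pfx])
       ).modify "coldesc" [] (· ++ [desc])
       ).modify "coltype" [] (· ++ [coltype])) init).items

-- ===== PORT B =====
def pvRowsOf (t : String × Option Int × String × String) : List (String × String × String) :=
  let pfx := t.1
  let num_cols := t.2.1
  let desc := t.2.2.1
  let coltype := t.2.2.2
  if (match num_cols with | some n => n != 0 | none => false) then
    (PySem.List.pyRange 1 (num_cols.getD 0 + 1) 1).map (fun i =>
      (pfx ++ PySem.Int.toStr i, desc ++ " " ++ PySem.Int.toStr i, coltype))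
  else
    [(pfx, desc, coltype)]

def generate_elms_info_alt (elm_desc : List (String × Option Int × String × String)) : List (String × List String) :=
  let rows := elm_desc.flatMap pvRowsOf
  let names := rows.map (·.1)
  let descs := rows.map (·.2.1)
  let types := rows.map (·.2.2)
  [("colnames", names), ("coldesc", descs), ("coltype", types)]

-- ===== PRECONDITION & SPEC =====
def Spec_generate_elms_info (elm_desc : List (String × Option Int × String × String)) (out : List (String × List String)) : Prop := out = generate_elms_info_alt elm_desc
instance (elm_desc : List (String × Option Int × String × String)) (out : List (String × List String)) : Decidable (Spec_generate_elms_info elm_desc out) := by unfold Spec_generate_elms_info; infer_instance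

-- ===== CLAIM (what is proved, stated in full; the proofs are below) =====
def Claim_equal_generate_elms_info : Prop := ∀ (elm_desc : List (String × Option Int × String × String)), Dom_generate_elms_info elm_desc → Spec_generate_elms_info elm_desc (generate_elms_info elm_desc)

-- ===== LEMMAS AND PROOFS =====

-- one triple-modify step on the three-key dict appends one element to each list
theorem pv_step (xs ys zs : List String) (a b c : String) :
    (((PySem.Dict.mk [("colnames", xs), ("coldesc", ys), ("coltype", zs)]).modify "colnames" [] (· ++ [a])
      ).modify "coldesc" [] (· ++ [b])
      ).modify "coltype" [] (· ++ [c])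
    = PySem.Dict.mk [("colnames", xs ++ [a]), ("coldesc", ys ++ [b]), ("coltype", zs ++ [c])] := by
  simp [PySem.Dict.modify, PySem.Dict.get?, PySem.Dict.getD, PySem.Dict.insert, PySem.Dict.contains]

-- folding triple-modify steps over any list appends the three projections
theorem pv_fold {α : Type} (l : List α) (f g h : α → String) (xs ys zs : List String) :
    l.foldl (fun d x =>
        ((d.modify "colnames" [] (· ++ [f x])
         ).modify "coldesc" [] (· ++ [g x])
         ).modify "coltype" [] (· ++ [h x]))
      (PySem.Dict.mk [("colnames", xs), ("coldesc", ys), ("coltype", zs)])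
    = PySem.Dict.mk [("colnames", xs ++ l.map f), ("coldesc", ys ++ l.map g), ("coltype", zs ++ l.map h)] := by
  induction l generalizing xs ys zs with
  | nil => simp
  | cons x l ih => simp [List.foldl_cons, pv_step, ih]

-- the outer fold, started from any three-key state, appends the transposed rows
theorem pv_outer (elm_desc : List (String × Option Int × String × String)) (xs ys zs : List String) :
    elm_desc.foldl (fun d t =>
      let pfx := t.1
      let num_cols := t.2.1
      let desc := t.2.2.1
      let coltype := t.2.2.2
      if (match num_cols with | some n => n != 0 | none => false) then
        (PySem.List.pyRange 1 (num_cols.getD 0 + 1) 1).foldl (fun d i =>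
          ((d.modify "colnames" [] (· ++ [pfx ++ PySem.Int.toStr i])
           ).modify "coldesc" [] (· ++ [desc ++ " " ++ PySem.Int.toStr i])
           ).modify "coltype" [] (· ++ [coltype])) d
      else
        ((d.modify "colnames" [] (· ++ [pfx])
         ).modify "coldesc" [] (· ++ [desc])
         ).modify "coltype" [] (· ++ [coltype]))
      (PySem.Dict.mk [("colnames", xs), ("coldesc", ys), ("coltype", zs)])
    = PySem.Dict.mk [("colnames", xs ++ (elm_desc.flatMap pvRowsOf).map (·.1)),
                     ("coldesc", ys ++ (elm_desc.flatMap pvRowsOf).map (·.2.1)),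
                     ("coltype", zs ++ (elm_desc.flatMap pvRowsOf).map (·.2.2))] := by
  induction elm_desc generalizing xs ys zs with
  | nil => simp
  | cons t rest ih =>
    by_cases hc : ((match t.2.1 with | some n => n != 0 | none => false) = true)
    · simp only [List.foldl_cons, if_pos hc, pv_fold]
      rw [ih]
      have hcomp : ((fun x : String × String × String => x.2.2) ∘
          fun i : Int => (t.1 ++ PySem.Int.toStr i, t.2.2.1 ++ " " ++ PySem.Int.toStr i, t.2.2.2))
          = fun _ => t.2.2.2 := rfl
      simp [pvRowsOf, if_pos hc, hcomp, List.map_const', PySem.List.length_pyRange_one]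
    · simp only [List.foldl_cons, if_neg hc, pv_step]
      rw [ih]
      simp [pvRowsOf, if_neg hc]

-- ===== VERDICT (by name: the statement is the Claim_ definition above) =====
theorem generate_elms_info_spec : Claim_equal_generate_elms_info := by
  intro elm_desc _
  unfold Spec_generate_elms_info generate_elms_info generate_elms_info_alt
  show (elm_desc.foldl _ (PySem.Dict.ofList [("colnames", []), ("coldesc", []), ("coltype", [])])).items = _
  have : PySem.Dict.ofList [("colnames", ([] : List String)), ("coldesc", []), ("coltype", [])]
      = PySem.Dict.mk [("colnames", []), ("coldesc", []), ("coltype", [])] := by decide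
  rw [this, pv_outer]
  simp
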